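-- pv_equiv track=rewrite | github.com/0x4C4A/pixel_png_to_svg | pixel_png_to_svg.py | trace_edges
-- ===== SOURCE A (Python) =====
-- def trace_edges(edges):
--     """
--     Trace edges into connected paths.
--     Returns list of paths, each path is a list of points.
--     """
--     # Create a lookup dictionary for fast edge finding
--     edge_dict = {}  # Maps starting point -> list of (edge_index, edge)
--     edges_list = list(edges)
--
--     for idx, edge in enumerate(edges_list):
--         start_point = edge[0]
--         if start_point not in edge_dict:
--             edge_dict[start_point] = []
--         edge_dict[start_point].append((idx, edge))
--
--     used = set()
--     paths = []
--
--     for start_edge_idx in range(len(edges_list)):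
--         if start_edge_idx in used:
--             continue
--
--         # Start a new path
--         path = []
--         current_edge = edges_list[start_edge_idx]
--         used.add(start_edge_idx)
--         path.append(current_edge[0])
--         current_point = current_edge[1]
--
--         # Follow connected edges
--         while True:
--             path.append(current_point)
--
--             # Find next edge that starts at current_point
--             found = False
--             if current_point in edge_dict:
--                 for edge_idx, edge in edge_dict[current_point]:
--                     if edge_idx not in used:
--                         used.add(edge_idx)
--                         current_point = edge[1]
--                         found = True
--                         break
--
--             if not found:
--                 break
--
--         paths.append(path)
--
--     return paths
-- ===== SOURCE B (Python) =====
-- def trace_edges(edges):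
--     """
--     Trace edges into connected paths.
--     Returns list of paths, each path is a list of points.
--     """
--     edges_list = list(edges)
--     n = len(edges_list)
--
--     # Bucket edges by starting point: point -> list of (edge_index, end_point)
--     buckets = {}
--     for idx, edge in enumerate(edges_list):
--         buckets.setdefault(edge[0], []).append((idx, edge[1]))
--
--     # Per-bucket cursor: everything before ptr[p] in buckets[p] is already used,
--     # so a bucket is never rescanned from the front.
--     ptr = {}
--     used = [False] * n
--     paths = []
--
--     for start in range(n):
--         if used[start]:
--             continue
--         used[start] = True
--         a, b = edges_list[start]
--         path = [a, b]
--         cur = b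
--         while True:
--             bucket = buckets.get(cur)
--             if bucket is None:
--                 break
--             i = ptr.get(cur, 0)
--             m = len(bucket)
--             while i < m and used[bucket[i][0]]:
--                 i += 1
--             if i == m:
--                 ptr[cur] = i
--                 break
--             idx, nxt = bucket[i]
--             ptr[cur] = i + 1
--             used[idx] = True
--             path.append(nxt)
--             cur = nxt
--         paths.append(path)
--
--     return paths
-- ===== Notes on version B (the rewrite author's own statement) =====
-- stated objective: faster
-- what changed: B replaces A's rescan of each bucket list from the front (skipping the used-set) by a per-point cursor that only moves forward past consumed edges, with a boolean array instead of a set of indices.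
import Mathlib
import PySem

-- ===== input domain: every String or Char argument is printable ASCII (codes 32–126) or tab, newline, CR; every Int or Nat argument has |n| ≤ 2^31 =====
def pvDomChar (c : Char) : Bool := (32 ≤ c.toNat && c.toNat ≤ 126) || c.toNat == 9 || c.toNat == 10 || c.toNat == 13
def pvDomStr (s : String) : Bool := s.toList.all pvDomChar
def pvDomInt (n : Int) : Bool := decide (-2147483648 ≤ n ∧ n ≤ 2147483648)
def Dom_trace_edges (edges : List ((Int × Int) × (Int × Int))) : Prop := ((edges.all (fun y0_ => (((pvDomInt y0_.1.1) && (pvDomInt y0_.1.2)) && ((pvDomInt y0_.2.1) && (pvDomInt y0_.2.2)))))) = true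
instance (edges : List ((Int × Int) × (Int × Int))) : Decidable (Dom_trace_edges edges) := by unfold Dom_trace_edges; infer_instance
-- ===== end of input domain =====

-- B traces the same paths but advances a per-point cursor past consumed edges instead of
-- rescanning each bucket from the front against the used-set (objective: faster worst case).
-- Both programs are pure (the input list is not mutated).

abbrev PvPt := Int × Int
abbrev PvEdge := PvPt × PvPt

-- ===== PORT A =====
-- edge_dict: start point -> list of (index, edge); indices are the nonnegative enumerate
-- positions, modelled as Nat. 'if start_point not in edge_dict: edge_dict[p] = []' then append.
def pvBuildDictA : List PvEdge → Nat → PySem.Dict PvPt (List (Nat × PvEdge)) →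
    PySem.Dict PvPt (List (Nat × PvEdge))
  | [], _, d => d
  | e :: rest, i, d =>
    let d := if d.contains e.1 then d else d.insert e.1 []
    pvBuildDictA rest (i + 1) (d.insert e.1 (d.getD e.1 [] ++ [(i, e)]))

-- 'for edge_idx, edge in edge_dict[current_point]: if edge_idx not in used: … break'
def pvFindA (used : PySem.Set Nat) : List (Nat × PvEdge) → Option (Nat × PvEdge)
  | [] => none
  | ie :: rest => if used.contains ie.1 then pvFindA used rest else some ie

-- the 'while True' loop; fuel (length+1) bounds the iterations, which is always enough
-- since every iteration but the last consumes a fresh edge index.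
def pvFollowA (d : PySem.Dict PvPt (List (Nat × PvEdge))) :
    Nat → PySem.Set Nat → List PvPt → PvPt → List PvPt × PySem.Set Nat
  | 0, used, path, p => (path ++ [p], used)
  | f + 1, used, path, p =>
    let path := path ++ [p]
    match pvFindA used (d.getD p []) with
    | none => (path, used)
    | some ie => pvFollowA d f (used.add ie.1) path ie.2.2

-- 'for start_edge_idx in range(len(edges_list))'
def pvOuterA (edges : List PvEdge) (d : PySem.Dict PvPt (List (Nat × PvEdge))) :
    List Nat → PySem.Set Nat → List (List PvPt) → List (List PvPt)
  | [], _, paths => paths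
  | i :: rest, used, paths =>
    if used.contains i then pvOuterA edges d rest used paths
    else
      let e := edges.getD i default   -- edges_list[start_edge_idx]: index always in range
      let r := pvFollowA d (edges.length + 1) (used.add i) [e.1] e.2
      pvOuterA edges d rest r.2 (paths ++ [r.1])

def trace_edges (edges : List ((Int × Int) × (Int × Int))) : List (List (Int × Int)) :=
  pvOuterA edges (pvBuildDictA edges 0 PySem.Dict.empty)
    (List.range edges.length) PySem.Set.empty []

-- ===== PORT B =====
-- buckets: start point -> list of (index, end point); 'setdefault(p, []).append(v)'.
def pvBuildBktB : List PvEdge → Nat → PySem.Dict PvPt (List (Nat × PvPt)) →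
    PySem.Dict PvPt (List (Nat × PvPt))
  | [], _, d => d
  | e :: rest, i, d => pvBuildBktB rest (i + 1) (d.insert e.1 (d.getD e.1 [] ++ [(i, e.2)]))

-- 'while i < m and used[bucket[i][0]]: i += 1'
def pvSkipB (used : List Bool) (bkt : List (Nat × PvPt)) (i : Nat) : Nat :=
  if h : i < bkt.length then
    if used.getD (bkt[i]).1 false then pvSkipB used bkt (i + 1) else i
  else i
termination_by bkt.length - i

-- the 'while True' loop of B; same fuel bound as A's.
def pvFollowB (bks : PySem.Dict PvPt (List (Nat × PvPt))) :
    Nat → List Bool → PySem.Dict PvPt Nat → List PvPt → PvPt →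
    List PvPt × List Bool × PySem.Dict PvPt Nat
  | 0, used, ptr, path, _ => (path, used, ptr)
  | f + 1, used, ptr, path, cur =>
    match bks.get? cur with
    | none => (path, used, ptr)
    | some bkt =>
      let i := pvSkipB used bkt (ptr.getD cur 0)
      if h : i < bkt.length then
        pvFollowB bks f (used.set (bkt[i]).1 true) (ptr.insert cur (i + 1))
          (path ++ [(bkt[i]).2]) (bkt[i]).2
      else (path, used, ptr.insert cur i)

def pvOuterB (edges : List PvEdge) (bks : PySem.Dict PvPt (List (Nat × PvPt))) :
    List Nat → List Bool → PySem.Dict PvPt Nat → List (List PvPt) → List (List PvPt)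
  | [], _, _, paths => paths
  | i :: rest, used, ptr, paths =>
    if used.getD i false then pvOuterB edges bks rest used ptr paths
    else
      let e := edges.getD i default   -- edges_list[start]: index always in range
      let r := pvFollowB bks (edges.length + 1) (used.set i true) ptr [e.1, e.2] e.2
      pvOuterB edges bks rest r.2.1 r.2.2 (paths ++ [r.1])

def trace_edges_alt (edges : List ((Int × Int) × (Int × Int))) : List (List (Int × Int)) :=
  pvOuterB edges (pvBuildBktB edges 0 PySem.Dict.empty)
    (List.range edges.length) (List.replicate edges.length false) PySem.Dict.empty []

-- ===== PRECONDITION & SPEC =====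
def Spec_trace_edges (edges : List ((Int × Int) × (Int × Int))) (out : List (List (Int × Int))) : Prop := out = trace_edges_alt edges
instance (edges : List ((Int × Int) × (Int × Int))) (out : List (List (Int × Int))) : Decidable (Spec_trace_edges edges out) := by unfold Spec_trace_edges; infer_instance

-- ===== CLAIM (what is proved, stated in full; the proofs are below) =====
def Claim_equal_trace_edges : Prop := ∀ (edges : List ((Int × Int) × (Int × Int))), Dom_trace_edges edges → Spec_trace_edges edges (trace_edges edges)

-- ===== LEMMAS AND PROOFS =====

-- effect of one iteration of A's dict-building loop on get?
theorem pv_stepA_get? (dA : PySem.Dict PvPt (List (Nat × PvEdge))) (k : PvPt)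
    (v : Nat × PvEdge) (p : PvPt) :
    ((if dA.contains k then dA else dA.insert k []).insert k
      ((if dA.contains k then dA else dA.insert k []).getD k [] ++ [v])).get? p
    = if p = k then some (dA.getD k [] ++ [v]) else dA.get? p := by
  by_cases hc : dA.contains k = true
  · simp only [hc, if_true, PySem.Dict.get?_insert]
  · simp only [Bool.not_eq_true] at hc
    simp only [hc, Bool.false_eq_true, if_false]
    rw [PySem.Dict.get?_insert, PySem.Dict.getD_insert_self,
      PySem.Dict.getD_of_not_contains dA [] hc]
    by_cases hp : p = k
    · simp [hp]
    · simp only [hp, if_false]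
      exact PySem.Dict.get?_insert_of_ne dA [] hp

-- relation between A's used-set and B's boolean array
def PvUsedRel (n : Nat) (uA : PySem.Set Nat) (uB : List Bool) : Prop :=
  uB.length = n ∧ ∀ j : Nat, uA.contains j = uB.getD j false

-- cursor invariant: every bucket entry strictly below the cursor is used
def PvPtrInv (bks : PySem.Dict PvPt (List (Nat × PvPt))) (uB : List Bool)
    (ptr : PySem.Dict PvPt Nat) : Prop :=
  ∀ p bkt, bks.get? p = some bkt →
    ∀ j (hj : j < bkt.length), j < ptr.getD p 0 → uB.getD (bkt[j]).1 false = true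

-- the two dictionaries are pointwise related by dropping the edge's start component
def PvDictRel (dA : PySem.Dict PvPt (List (Nat × PvEdge)))
    (bks : PySem.Dict PvPt (List (Nat × PvPt))) : Prop :=
  ∀ p, bks.get? p = (dA.get? p).map (List.map (fun x => (x.1, x.2.2)))

-- all indices stored in A's dict are < n
def PvIdxBound (n : Nat) (dA : PySem.Dict PvPt (List (Nat × PvEdge))) : Prop :=
  ∀ p bkt, dA.get? p = some bkt → ∀ x ∈ bkt, x.1 < n


theorem pv_build_rel (edges : List PvEdge) (i : Nat)
    (dA : PySem.Dict PvPt (List (Nat × PvEdge))) (bks : PySem.Dict PvPt (List (Nat × PvPt)))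
    (h : PvDictRel dA bks) :
    PvDictRel (pvBuildDictA edges i dA) (pvBuildBktB edges i bks) := by
  induction edges generalizing i dA bks with
  | nil => simpa [pvBuildDictA, pvBuildBktB] using h
  | cons e rest ih =>
    simp only [pvBuildDictA, pvBuildBktB]
    apply ih
    intro p
    rw [pv_stepA_get?, PySem.Dict.get?_insert]
    by_cases hp : p = e.1
    · simp only [hp, if_true]
      rw [PySem.Dict.getD_eq_get?_getD, PySem.Dict.getD_eq_get?_getD, h e.1]
      cases dA.get? e.1 <;> simp
    · simp only [hp, if_false]
      exact h p

theorem pv_build_bound (edges : List PvEdge) (i : Nat) (n : Nat)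
    (dA : PySem.Dict PvPt (List (Nat × PvEdge)))
    (hn : i + edges.length ≤ n)
    (h : PvIdxBound n dA) :
    PvIdxBound n (pvBuildDictA edges i dA) := by
  induction edges generalizing i dA with
  | nil => simpa [pvBuildDictA] using h
  | cons e rest ih =>
    simp only [pvBuildDictA]
    apply ih
    · simp only [List.length_cons] at hn; omega
    · intro p bkt hget x hx
      rw [pv_stepA_get?] at hget
      by_cases hp : p = e.1
      · simp only [hp, if_true] at hget
        cases hget
        rcases List.mem_append.1 hx with hx | hx
        · rw [PySem.Dict.getD_eq_get?_getD] at hx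
          cases hg : dA.get? e.1 with
          | none => rw [hg] at hx; simp at hx
          | some l => rw [hg] at hx; exact h _ _ hg x hx
        · simp only [List.mem_singleton] at hx
          subst hx
          simp only [List.length_cons] at hn; omega
      · simp only [hp, if_false] at hget
        exact h _ _ hget x hx

-- pvSkipB only moves the cursor forward, over used entries, and stops at an unused one
theorem pv_skip_spec (used : List Bool) (bkt : List (Nat × PvPt)) (i : Nat) :
    i ≤ pvSkipB used bkt i ∧
    (∀ j (hj : j < bkt.length), i ≤ j → j < pvSkipB used bkt i →
      used.getD (bkt[j]).1 false = true) ∧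
    (∀ h : pvSkipB used bkt i < bkt.length,
      used.getD (bkt[pvSkipB used bkt i]'h).1 false = false) := by
  induction i using pvSkipB.induct used bkt with
  | case1 i h hu ih =>
    rcases ih with ⟨h1, h2, h3⟩
    rw [pvSkipB, dif_pos h, if_pos hu]
    refine ⟨by omega, ?_, h3⟩
    intro j hj hij hlt
    rcases Nat.eq_or_lt_of_le hij with rfl | hij'
    · exact hu
    · exact h2 j hj hij' hlt
  | case2 i h hu =>
    rw [pvSkipB, dif_pos h, if_neg hu]
    exact ⟨le_refl _, fun j hj hij hlt => absurd hlt (by omega), fun _ => by simpa using hu⟩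
  | case3 i h =>
    rw [pvSkipB, dif_neg h]
    exact ⟨le_refl _, fun j hj hij hlt => absurd hlt (by omega), fun hlt => absurd hlt h⟩

-- A's first-unused scan, characterised by a position with a used prefix
theorem pv_findA_some (uA : PySem.Set Nat) (l : List (Nat × PvEdge)) (i : Nat)
    (hi : i < l.length)
    (hpre : ∀ j (hj : j < l.length), j < i → uA.contains (l[j]).1 = true)
    (hcur : uA.contains (l[i]).1 = false) :
    pvFindA uA l = some l[i] := by
  induction l generalizing i with
  | nil => simp at hi
  | cons x rest ih =>
    cases i with
    | zero =>
      simp only [List.getElem_cons_zero] at hcur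
      simp only [pvFindA, hcur, Bool.false_eq_true, if_false, List.getElem_cons_zero]
    | succ i' =>
      have hx : uA.contains x.1 = true := by
        have := hpre 0 (by simp) (Nat.succ_pos _); simpa using this
      simp only [pvFindA, hx, if_true, List.getElem_cons_succ]
      exact ih i' (by simpa using hi)
        (fun j hj hji => by
          have := hpre (j+1) (by simpa using Nat.succ_lt_succ hj) (Nat.succ_lt_succ hji)
          simpa using this)
        (by simpa using hcur)

theorem pv_findA_none (uA : PySem.Set Nat) (l : List (Nat × PvEdge))
    (hall : ∀ j (hj : j < l.length), uA.contains (l[j]).1 = true) :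
    pvFindA uA l = none := by
  induction l with
  | nil => rfl
  | cons x rest ih =>
    have hx : uA.contains x.1 = true := by simpa using hall 0 (by simp)
    simp only [pvFindA, hx, if_true]
    exact ih (fun j hj => by simpa using hall (j+1) (by simpa using Nat.succ_lt_succ hj))

-- adding an index to A's set matches setting the bit in B's array
theorem pv_used_rel_add (n : Nat) (uA : PySem.Set Nat) (uB : List Bool) (k : Nat)
    (hk : k < n) (h : PvUsedRel n uA uB) :
    PvUsedRel n (uA.add k) (uB.set k true) := by
  rcases h with ⟨hlen, hrel⟩
  refine ⟨by simpa using hlen, ?_⟩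
  intro j
  by_cases hjk : j = k
  · subst hjk
    have hmem : j ∈ uA.add j := (PySem.Set.mem_add _ _ _).2 (Or.inr rfl)
    have h1 : (uA.add j).contains j = true := by
      simpa [PySem.Set.contains] using hmem
    rw [h1, List.getD_eq_getElem?_getD, List.getElem?_set_self (by omega)]
    simp
  · have h2 : (uA.add k).contains j = uA.contains j := by
      simp only [PySem.Set.contains]
      by_cases hj : j ∈ uA
      · have : j ∈ uA.add k := (PySem.Set.mem_add _ _ _).2 (Or.inl hj)
        simp [hj, this]
      · have : j ∉ uA.add k := fun hc => by
          rcases (PySem.Set.mem_add _ _ _).1 hc with h' | h'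
          · exact hj h'
          · exact hjk h'
        simp [hj, this]
    rw [h2, hrel j, List.getD_eq_getElem?_getD, List.getD_eq_getElem?_getD,
      List.getElem?_set_ne (fun h' => hjk h'.symm)]

theorem pv_getD_mono (uB : List Bool) (k m : Nat)
    (h : uB.getD m false = true) : (uB.set k true).getD m false = true := by
  rw [List.getD_eq_getElem?_getD] at h ⊢
  by_cases hmk : m = k
  · subst hmk
    have hm : m < uB.length := by
      by_contra hc
      rw [List.getElem?_eq_none (by omega)] at h; simp at h
    rw [List.getElem?_set_self (by simpa using hm)]; simp
  · rw [List.getElem?_set_ne (fun h' => hmk h'.symm)]; exact h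

-- the inner while-loops simulate each other
theorem pv_follow_sim (edges : List PvEdge)
    (dA : PySem.Dict PvPt (List (Nat × PvEdge))) (bks : PySem.Dict PvPt (List (Nat × PvPt)))
    (hdr : PvDictRel dA bks) (hib : PvIdxBound edges.length dA)
    (f : Nat) :
    ∀ (uA : PySem.Set Nat) (uB : List Bool) (ptr : PySem.Dict PvPt Nat)
      (path : List PvPt) (p : PvPt),
      PvUsedRel edges.length uA uB → PvPtrInv bks uB ptr →
      (pvFollowA dA f uA path p).1 = (pvFollowB bks f uB ptr (path ++ [p]) p).1 ∧
      PvUsedRel edges.length (pvFollowA dA f uA path p).2 (pvFollowB bks f uB ptr (path ++ [p]) p).2.1 ∧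
      PvPtrInv bks (pvFollowB bks f uB ptr (path ++ [p]) p).2.1 (pvFollowB bks f uB ptr (path ++ [p]) p).2.2 := by
  induction f with
  | zero =>
    intro uA uB ptr path p hur hpi
    exact ⟨rfl, hur, hpi⟩
  | succ f ih =>
    intro uA uB ptr path p hur hpi
    cases hg : bks.get? p with
    | none =>
      have hgA : dA.get? p = none := by
        have := hdr p; rw [hg] at this
        cases h' : dA.get? p
        · rfl
        · rw [h'] at this; simp at this
      have hgd : dA.getD p [] = [] := PySem.Dict.getD_of_get?_eq_none _ _ hgA
      simp only [pvFollowA, pvFollowB, hg, hgd, pvFindA]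
      exact ⟨by trivial, hur, hpi⟩
    | some bkt =>
      have hfull : ∃ full, dA.get? p = some full ∧ bkt = full.map (fun x => (x.1, x.2.2)) := by
        have := hdr p; rw [hg] at this
        cases h' : dA.get? p with
        | none => rw [h'] at this; simp at this
        | some l => rw [h'] at this; simp at this; exact ⟨l, rfl, this⟩
      rcases hfull with ⟨full, hfA, hbkt⟩
      have hgetDfull : dA.getD p [] = full := PySem.Dict.getD_of_get?_eq_some _ _ hfA
      have hlen : bkt.length = full.length := by rw [hbkt]; simp
      have hidx : ∀ j (hj : j < bkt.length), (bkt[j]).1 = (full[j]'(by omega)).1 := by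
        intro j hj; subst hbkt; simp
      have hsnd : ∀ j (hj : j < bkt.length), (bkt[j]).2 = (full[j]'(by omega)).2.2 := by
        intro j hj; subst hbkt; simp
      rcases pv_skip_spec uB bkt (ptr.getD p 0) with ⟨hsk1, hsk2, hsk3⟩
      simp only [pvFollowA, pvFollowB, hg, hgetDfull]
      generalize hidef : pvSkipB uB bkt (ptr.getD p 0) = i at hsk1 hsk2 hsk3 ⊢
      have hbelow : ∀ j (hj : j < bkt.length), j < i → uB.getD (bkt[j]).1 false = true := by
        intro j hj hji
        by_cases hcase : j < ptr.getD p 0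
        · exact hpi p bkt hg j hj hcase
        · exact hsk2 j hj (by omega) hji
      by_cases hil : i < bkt.length
      · -- found an unused edge at position i
        have hfindA : pvFindA uA full = some (full[i]'(by omega)) := by
          apply pv_findA_some uA full i (by omega)
          · intro j hj hji
            rw [hur.2]
            have := hbelow j (by omega) hji
            rw [hidx j (by omega)] at this
            exact this
          · rw [hur.2, ← hidx i hil]
            exact hsk3 hil
        rw [dif_pos hil]
        simp only [hfindA]
        have hidxeq : (bkt[i]).1 = (full[i]'(by omega)).1 := hidx i hil
        have hsndeq : (bkt[i]).2 = (full[i]'(by omega)).2.2 := hsnd i hil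
        have hklt : (full[i]'(by omega)).1 < edges.length :=
          hib p full hfA _ (List.getElem_mem _)
        have hur' : PvUsedRel edges.length (uA.add (full[i]'(by omega)).1)
            (uB.set (bkt[i]).1 true) := by
          rw [hidxeq]
          exact pv_used_rel_add _ _ _ _ hklt hur
        have hpi' : PvPtrInv bks (uB.set (bkt[i]).1 true) (ptr.insert p (i + 1)) := by
          intro q bq hq j hj hjlt
          by_cases hqp : q = p
          · subst hqp
            rw [hg] at hq
            cases hq
            rw [PySem.Dict.getD_insert_self] at hjlt
            rcases Nat.lt_succ_iff_lt_or_eq.1 hjlt with hji | hje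
            · exact pv_getD_mono _ _ _ (hbelow j hj hji)
            · subst hje
              rw [List.getD_eq_getElem?_getD,
                List.getElem?_set_self (by rw [hur.1, hidxeq]; simpa using hklt)]
              simp
          · rw [PySem.Dict.getD_insert_of_ne _ _ _ hqp] at hjlt
            exact pv_getD_mono _ _ _ (hpi q bq hq j hj hjlt)
        have hrec := ih (uA.add (full[i]'(by omega)).1) (uB.set (bkt[i]).1 true)
          (ptr.insert p (i + 1)) (path ++ [p]) ((full[i]'(by omega)).2.2) hur' hpi'
        rw [hsndeq]
        exact hrec
      · -- no unused edge left in this bucket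
        have hfindA : pvFindA uA full = none := by
          apply pv_findA_none
          intro j hj
          rw [hur.2]
          have := hbelow j (by omega) (by omega)
          rw [hidx j (by omega)] at this
          exact this
        rw [dif_neg hil]
        simp only [hfindA]
        refine ⟨by trivial, hur, ?_⟩
        intro q bq hq j hj hjlt
        by_cases hqp : q = p
        · subst hqp
          rw [hg] at hq
          cases hq
          rw [PySem.Dict.getD_insert_self] at hjlt
          exact hbelow j hj hjlt
        · rw [PySem.Dict.getD_insert_of_ne _ _ _ hqp] at hjlt
          exact hpi q bq hq j hj hjlt

-- the outer loops simulate each other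
theorem pv_outer_sim (edges : List PvEdge)
    (dA : PySem.Dict PvPt (List (Nat × PvEdge))) (bks : PySem.Dict PvPt (List (Nat × PvPt)))
    (hdr : PvDictRel dA bks) (hib : PvIdxBound edges.length dA)
    (idxs : List Nat) (hidxs : ∀ i ∈ idxs, i < edges.length) :
    ∀ (uA : PySem.Set Nat) (uB : List Bool) (ptr : PySem.Dict PvPt Nat)
      (paths : List (List PvPt)),
      PvUsedRel edges.length uA uB → PvPtrInv bks uB ptr →
      pvOuterA edges dA idxs uA paths = pvOuterB edges bks idxs uB ptr paths := by
  induction idxs with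
  | nil => intro uA uB ptr paths _ _; rfl
  | cons i rest ih =>
    intro uA uB ptr paths hur hpi
    have hrest : ∀ j ∈ rest, j < edges.length := fun j hj =>
      hidxs j (List.mem_cons_of_mem i hj)
    have hi : i < edges.length := hidxs i List.mem_cons_self
    simp only [pvOuterA, pvOuterB]
    have hurel := hur.2
    rw [← hurel i]
    cases hcont : uA.contains i with
    | true =>
      simp only [if_pos]
      exact ih hrest uA uB ptr paths hur hpi
    | false =>
      simp only [Bool.false_eq_true, if_neg, not_false_eq_true]
      have hur' : PvUsedRel edges.length (uA.add i) (uB.set i true) :=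
        pv_used_rel_add _ _ _ _ hi hur
      have hpi' : PvPtrInv bks (uB.set i true) ptr := by
        intro q bq hq j hj hjlt
        exact pv_getD_mono _ _ _ (hpi q bq hq j hj hjlt)
      have hsim := pv_follow_sim edges dA bks hdr hib (edges.length + 1)
        (uA.add i) (uB.set i true) ptr [(edges.getD i default).1] (edges.getD i default).2
        hur' hpi'
      rcases hsim with ⟨hpath, hur'', hpi''⟩
      have hlist : ([(edges.getD i default).1] : List PvPt) ++ [(edges.getD i default).2]
          = [(edges.getD i default).1, (edges.getD i default).2] := rfl
      rw [hlist] at hpath hur'' hpi''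
      rw [hpath]
      exact ih hrest _ _ _ _ hur'' hpi''

-- ===== VERDICT (by name: the statement is the Claim_ definition above) =====
theorem trace_edges_spec : Claim_equal_trace_edges := by
  intro edges _
  show trace_edges edges = trace_edges_alt edges
  unfold trace_edges trace_edges_alt
  apply pv_outer_sim
  · exact pv_build_rel edges 0 _ _ (fun p => by simp [PySem.Dict.get?_empty])
  · exact pv_build_bound edges 0 edges.length _ (by omega)
      (fun p bkt h => by rw [PySem.Dict.get?_empty] at h; cases h)
  · intro i hi; exact List.mem_range.1 hi
  · exact ⟨by simp, fun j => by simp [PySem.Set.contains, PySem.Set.empty]⟩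
  · intro q bq hq j hj hjlt
    rw [PySem.Dict.getD_empty] at hjlt
    omega
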